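-- pv_equiv track=rewrite | github.com/DayStarEngineering/DataAnalysis | scripts/imgparse.py | batch2exptime
-- ===== SOURCE A (Python) =====
-- def batch2exptime(batch):
--     '''Returns the exposure time (ms) of an image as an int based on its batch number.'''
--
--     # Daytime, batches 0-59, 20,30,40,50 ms exposures
--     if batch in range(0, 60): # 0-59
--         index = 0
--         for i in range(0, 6): # 5 daytime bursts
--             if batch in range(0+index,3+index):    # 0-2
--                 exptime = 20
--                 return exptime
--             elif batch in range(3+index,6+index):  # 3-5
--                 exptime = 30
--                 return exptime
--             elif batch in range(6+index,9+index):  # 6-8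
--                 exptime = 40
--                 return exptime
--             elif batch in range(9+index,12+index): # 9-11
--                 exptime = 50
--                 return exptime
--             index = index + 12
--
--     # Twilight, batches 60-143, 20,30,40,50 ms exposures
--     elif batch in range(60, 144): #60-143
--         index = 60
--         for i in range(0,7*3): # 7 daytime bursts x 3 gain settings
--             if batch == index + 0:   # 0
--                 exptime = 20
--                 return exptime
--             elif batch == index + 1: # 1
--                 exptime = 30
--                 return exptime
--             elif batch == index + 2: # 2
--                 exptime = 40
--                 return exptime
--             elif batch == index + 3: # 3
--                 exptime = 50
--                 return exptime
--             index = index + 4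
--
--     # Nightime, batches 144-197, 30,50,70ms exposures
--     elif batch in range(144, 198): # 144-197
--         index = 144
--         for i in range(0, 7): # 6 nighttime bursts
--             if batch in range(0+index,3+index):    # 0-2
--                 exptime = 30
--                 return exptime
--             elif batch in range(3+index,6+index):  # 3-5
--                 exptime = 50
--                 return exptime
--             elif batch in range(6+index,9+index):  # 6-8
--                 exptime = 70
--                 return exptime
--             index = index + 9
--
--     # Not a valid batch number
--     else:
--         raise RuntimeError('Batch number is out of bounds: 0-197.')
-- ===== SOURCE B (Python) =====
-- def batch2exptime(batch):
--     '''Returns the exposure time (ms) of an image as an int based on its batch number.'''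
--     if batch in range(0, 60):
--         # daytime: 5 bursts of 12, each burst = 4 groups of 3 (20/30/40/50 ms)
--         return 20 + 10 * ((batch % 12) // 3)
--     elif batch in range(60, 144):
--         # twilight: blocks of 4 (20/30/40/50 ms)
--         return 20 + 10 * ((batch - 60) % 4)
--     elif batch in range(144, 198):
--         # nighttime: blocks of 9, 3 groups of 3 (30/50/70 ms)
--         return 30 + 20 * (((batch - 144) % 9) // 3)
--     else:
--         raise RuntimeError('Batch number is out of bounds: 0-197.')
-- ===== Notes on version B (the rewrite author's own statement) =====
-- stated objective: simpler
-- what changed: Each bounded scanning loop over sub-ranges is replaced by a guarded closed-form arithmetic expression (mod/floor-div), leaving no loops.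
import Mathlib
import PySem

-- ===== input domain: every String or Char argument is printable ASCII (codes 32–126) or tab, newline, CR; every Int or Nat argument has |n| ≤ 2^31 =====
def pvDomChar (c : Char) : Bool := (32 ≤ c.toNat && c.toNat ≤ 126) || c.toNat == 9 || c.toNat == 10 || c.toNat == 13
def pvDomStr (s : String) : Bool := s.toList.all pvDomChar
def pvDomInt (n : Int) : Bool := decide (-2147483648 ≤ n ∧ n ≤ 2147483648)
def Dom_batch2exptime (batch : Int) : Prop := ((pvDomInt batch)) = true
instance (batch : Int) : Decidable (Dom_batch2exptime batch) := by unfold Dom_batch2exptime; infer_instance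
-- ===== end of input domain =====

-- B replaces A's bounded scanning loops by guarded closed-form mod/floor-div arithmetic (objective: simpler).

-- ===== PORT A =====
-- 'batch in range(a,b)' (step 1, Int batch) is a ≤ batch < b; exact.
-- daytime loop: for i in range(0,6), state index (starts 0, +12 per iteration); none = fell through (no return)
def pvDayLoop_batch2exptime (batch : Int) (index : Int) : Nat → Option Int
  | 0 => none
  | n+1 =>
    if 0 + index ≤ batch ∧ batch < 3 + index then some 20
    else if 3 + index ≤ batch ∧ batch < 6 + index then some 30
    else if 6 + index ≤ batch ∧ batch < 9 + index then some 40
    else if 9 + index ≤ batch ∧ batch < 12 + index then some 50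
    else pvDayLoop_batch2exptime batch (index + 12) n

-- twilight loop: for i in range(0,7*3), index starts 60, +4 per iteration
def pvTwiLoop_batch2exptime (batch : Int) (index : Int) : Nat → Option Int
  | 0 => none
  | n+1 =>
    if batch = index + 0 then some 20
    else if batch = index + 1 then some 30
    else if batch = index + 2 then some 40
    else if batch = index + 3 then some 50
    else pvTwiLoop_batch2exptime batch (index + 4) n

-- nighttime loop: for i in range(0,7), index starts 144, +9 per iteration
def pvNightLoop_batch2exptime (batch : Int) (index : Int) : Nat → Option Int
  | 0 => none
  | n+1 =>
    if 0 + index ≤ batch ∧ batch < 3 + index then some 30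
    else if 3 + index ≤ batch ∧ batch < 6 + index then some 50
    else if 6 + index ≤ batch ∧ batch < 9 + index then some 70
    else pvNightLoop_batch2exptime batch (index + 9) n

-- else-branch raises RuntimeError (excluded by Pre_); the .getD 0 / final 0 are unreachable under Pre_.
def batch2exptime (batch : Int) : Int :=
  if 0 ≤ batch ∧ batch < 60 then (pvDayLoop_batch2exptime batch 0 6).getD 0
  else if 60 ≤ batch ∧ batch < 144 then (pvTwiLoop_batch2exptime batch 60 21).getD 0
  else if 144 ≤ batch ∧ batch < 198 then (pvNightLoop_batch2exptime batch 144 7).getD 0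
  else 0

-- ===== PORT B =====
-- Python % and // on these nonnegative operands: PySem.Int.mod / floordiv (exact)
def batch2exptime_alt (batch : Int) : Int :=
  if 0 ≤ batch ∧ batch < 60 then 20 + 10 * (PySem.Int.floordiv (PySem.Int.mod batch 12) 3)
  else if 60 ≤ batch ∧ batch < 144 then 20 + 10 * (PySem.Int.mod (batch - 60) 4)
  else if 144 ≤ batch ∧ batch < 198 then 30 + 20 * (PySem.Int.floordiv (PySem.Int.mod (batch - 144) 9) 3)
  else 0

-- ===== PRECONDITION & SPEC =====
-- Pre_ excludes exactly the inputs on which A raises RuntimeError (batch outside 0..197).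
def Pre_batch2exptime (batch : Int) : Prop := 0 ≤ batch ∧ batch ≤ 197
instance (batch : Int) : Decidable (Pre_batch2exptime batch) := by unfold Pre_batch2exptime; infer_instance
def pvWitness_batch2exptime : Int := (100)

def Spec_batch2exptime (batch : Int) (out : Int) : Prop := out = batch2exptime_alt batch
instance (batch : Int) (out : Int) : Decidable (Spec_batch2exptime batch out) := by unfold Spec_batch2exptime; infer_instance

-- ===== CLAIM =====
def Claim_equal_batch2exptime : Prop := ∀ (batch : Int), Dom_batch2exptime batch → Pre_batch2exptime batch → Spec_batch2exptime batch (batch2exptime batch)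

-- ===== LEMMAS AND PROOFS =====
set_option maxRecDepth 4000 in
theorem batch2exptime_agree_on_range :
    ∀ n ∈ List.range 198, batch2exptime (n : Int) = batch2exptime_alt (n : Int) := by decide

-- ===== VERDICT =====
theorem batch2exptime_spec : Claim_equal_batch2exptime := by
  intro batch _ hpre
  unfold Spec_batch2exptime
  obtain ⟨h0, h1⟩ := hpre
  lift batch to ℕ using h0 with n
  have hn : n ∈ List.range 198 := by
    simp only [List.mem_range]
    exact_mod_cast Int.lt_add_one_iff.mpr h1
  exact batch2exptime_agree_on_range n hn
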